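-- pv_equiv track=rewrite | github.com/realoneofu/prog-alused | testing/solution.py | fruit_order
-- ===== SOURCE A (Python) =====
-- def fruit_order(small_baskets: int, big_baskets: int, ordered_amount: int) -> int:
--     """
--     Return number of small fruit baskets if it's possible to finish the order, otherwise return -1.
--
--     (4, 1, 9) -> 4
--     (3, 1, 10) -> -1
--     """
--     if ordered_amount % 5 == 0 and (ordered_amount // 5) <= big_baskets:
--         return 0
--     elif small_baskets >= ordered_amount and ordered_amount >= 0:
--         return ordered_amount
--     elif small_baskets + (big_baskets * 5) == ordered_amount:
--         return small_baskets
--     else: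
--         for bigbas in range(big_baskets):
--             weight = (bigbas + 1) * 5
--             if weight == ordered_amount:
--                 return 0
--             for smallbas in range(small_baskets):
--                 weight += 1
--                 if weight == ordered_amount:
--                     return smallbas + 1
--     return -1
-- ===== SOURCE B (Python) =====
-- def fruit_order(small_baskets: int, big_baskets: int, ordered_amount: int) -> int:
--     if ordered_amount % 5 == 0 and ordered_amount // 5 <= big_baskets:
--         return 0
--     if 0 <= ordered_amount <= small_baskets:
--         return ordered_amount
--     if small_baskets + big_baskets * 5 == ordered_amount:
--         return small_baskets
--     # smallest big-basket count b >= 1 whose remainder fits in the small baskets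
--     b = max(1, -((small_baskets - ordered_amount) // 5))
--     if b <= big_baskets and 1 <= ordered_amount - 5 * b <= small_baskets:
--         return ordered_amount - 5 * b
--     return -1
-- ===== Notes on version B (the rewrite author's own statement) =====
-- stated objective: alternative
-- what changed: A's fallback nested loops over all big-basket counts and all small-basket counts are replaced by closed-form arithmetic: the smallest usable big-basket count via ceiling division, with the remainder checked against the small-basket supply.
import Mathlib
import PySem

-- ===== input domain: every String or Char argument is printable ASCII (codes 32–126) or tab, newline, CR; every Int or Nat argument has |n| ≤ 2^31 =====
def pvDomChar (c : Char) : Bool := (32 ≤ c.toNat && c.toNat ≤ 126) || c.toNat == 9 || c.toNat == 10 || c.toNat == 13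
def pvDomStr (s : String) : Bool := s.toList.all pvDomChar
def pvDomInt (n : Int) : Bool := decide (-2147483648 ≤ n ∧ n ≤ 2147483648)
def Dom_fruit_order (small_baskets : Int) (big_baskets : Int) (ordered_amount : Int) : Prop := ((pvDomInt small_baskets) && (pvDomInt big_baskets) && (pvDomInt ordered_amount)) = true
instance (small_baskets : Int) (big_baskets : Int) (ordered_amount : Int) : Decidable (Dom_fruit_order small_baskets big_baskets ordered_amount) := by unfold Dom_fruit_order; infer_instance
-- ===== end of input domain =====

-- B replaces A's fallback nested search loops by closed-form ceil-division arithmetic (objective: alternative).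

-- ===== PORT A =====
-- inner 'for smallbas in range(small_baskets)' loop: weight += 1; early return smallbas+1
def fruitInner (ordered : Int) : List Int → Int → Option Int
  | [], _ => none
  | smallbas :: rest, weight =>
    let weight' := weight + 1
    if weight' = ordered then some (smallbas + 1) else fruitInner ordered rest weight'

-- outer 'for bigbas in range(big_baskets)' loop with early returns
def fruitOuter (small_baskets ordered : Int) : List Int → Option Int
  | [] => none
  | bigbas :: rest =>
    let weight := (bigbas + 1) * 5
    if weight = ordered then some 0
    else
      match fruitInner ordered (PySem.List.pyRange 0 small_baskets 1) weight with
      | some r => some r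
      | none => fruitOuter small_baskets ordered rest

def fruit_order (small_baskets : Int) (big_baskets : Int) (ordered_amount : Int) : Int :=
  if PySem.Int.mod ordered_amount 5 = 0 ∧ PySem.Int.floordiv ordered_amount 5 ≤ big_baskets then 0
  else if small_baskets ≥ ordered_amount ∧ ordered_amount ≥ 0 then ordered_amount
  else if small_baskets + big_baskets * 5 = ordered_amount then small_baskets
  else
    match fruitOuter small_baskets ordered_amount (PySem.List.pyRange 0 big_baskets 1) with
    | some r => r
    | none => -1

-- ===== PORT B =====
def fruit_order_alt (small_baskets : Int) (big_baskets : Int) (ordered_amount : Int) : Int :=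
  if PySem.Int.mod ordered_amount 5 = 0 ∧ PySem.Int.floordiv ordered_amount 5 ≤ big_baskets then 0
  else if 0 ≤ ordered_amount ∧ ordered_amount ≤ small_baskets then ordered_amount
  else if small_baskets + big_baskets * 5 = ordered_amount then small_baskets
  else
    -- smallest big-basket count b ≥ 1 whose remainder fits in the small baskets
    let b := max 1 (-(PySem.Int.floordiv (small_baskets - ordered_amount) 5))
    if b ≤ big_baskets ∧ 1 ≤ ordered_amount - 5 * b ∧ ordered_amount - 5 * b ≤ small_baskets then
      ordered_amount - 5 * b
    else -1

-- ===== PRECONDITION & SPEC =====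
def Spec_fruit_order (small_baskets : Int) (big_baskets : Int) (ordered_amount : Int) (out : Int) : Prop := out = fruit_order_alt small_baskets big_baskets ordered_amount
instance (small_baskets : Int) (big_baskets : Int) (ordered_amount : Int) (out : Int) : Decidable (Spec_fruit_order small_baskets big_baskets ordered_amount out) := by unfold Spec_fruit_order; infer_instance

-- ===== CLAIM (what is proved, stated in full; the proofs are below) =====
def Claim_equal_fruit_order : Prop := ∀ (small_baskets : Int) (big_baskets : Int) (ordered_amount : Int), Dom_fruit_order small_baskets big_baskets ordered_amount → Spec_fruit_order small_baskets big_baskets ordered_amount (fruit_order small_baskets big_baskets ordered_amount)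

-- ===== LEMMAS AND PROOFS =====

-- the inner loop over range(a, small) starting at weight w hits exactly when w+1 ≤ o ≤ w + (small - a)
theorem fruitInner_eq (o small : Int) : ∀ (n : Nat) (a w : Int), (small - a).toNat = n →
    fruitInner o (PySem.List.pyRange a small 1) w =
      (if w + 1 ≤ o ∧ o ≤ w + (small - a) then some (a + (o - w)) else none) := by
  intro n
  induction n with
  | zero =>
    intro a w hn
    rw [PySem.List.pyRange_one_eq_nil (by omega)]
    simp only [fruitInner]
    rw [if_neg (show ¬(w + 1 ≤ o ∧ o ≤ w + (small - a)) by omega)]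
  | succ k ih =>
    intro a w hn
    rw [PySem.List.pyRange_one_cons (by omega)]
    simp only [fruitInner]
    by_cases h : w + 1 = o
    · rw [if_pos h, if_pos (show w + 1 ≤ o ∧ o ≤ w + (small - a) by omega)]
      congr 1
      omega
    · rw [if_neg h, ih (a + 1) (w + 1) (by omega)]
      split_ifs with h1 h2 h2
      · congr 1; omega
      · exfalso; omega
      · exfalso; omega
      · rfl

-- the outer loop over range(a, big), given that branch 1 of A failed, equals the closed form of B
theorem fruitOuter_eq (o small big : Int)
    (hb1 : ¬(PySem.Int.mod o 5 = 0 ∧ PySem.Int.floordiv o 5 ≤ big)) :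
    ∀ (n : Nat) (a : Int), (big - a).toNat = n →
    fruitOuter small o (PySem.List.pyRange a big 1) =
      (if max (a + 1) (-(PySem.Int.floordiv (small - o) 5)) ≤ big ∧
          1 ≤ o - 5 * max (a + 1) (-(PySem.Int.floordiv (small - o) 5)) ∧
          o - 5 * max (a + 1) (-(PySem.Int.floordiv (small - o) 5)) ≤ small
       then some (o - 5 * max (a + 1) (-(PySem.Int.floordiv (small - o) 5))) else none) := by
  have hid := PySem.Int.floordiv_mul_add_mod (small - o) 5
  have hr0 := PySem.Int.mod_nonneg (small - o) (b := 5) (by omega)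
  have hr5 := PySem.Int.mod_lt (small - o) (b := 5) (by omega)
  set q := PySem.Int.floordiv (small - o) 5 with hq
  intro n
  induction n with
  | zero =>
    intro a hn
    rw [PySem.List.pyRange_one_eq_nil (by omega)]
    simp only [fruitOuter]
    rw [if_neg (by omega)]
  | succ k ih =>
    intro a hn
    rw [PySem.List.pyRange_one_cons (by omega)]
    simp only [fruitOuter]
    by_cases h0 : (a + 1) * 5 = o
    · exfalso
      apply hb1
      constructor
      · rw [PySem.Int.mod_eq_zero_iff_dvd]
        exact ⟨a + 1, by omega⟩
      · have : PySem.Int.floordiv o 5 = a + 1 := by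
          rw [PySem.Int.floordiv_eq_iff_of_pos (by omega)]
          omega
        omega
    · rw [if_neg h0, fruitInner_eq o small (small - 0).toNat 0 ((a + 1) * 5) rfl]
      by_cases hhit : (a + 1) * 5 + 1 ≤ o ∧ o ≤ (a + 1) * 5 + (small - 0)
      · rw [if_pos hhit]
        have hb : max (a + 1) (-q) = a + 1 := by omega
        rw [hb]
        rw [if_pos (show a + 1 ≤ big ∧ 1 ≤ o - 5 * (a + 1) ∧ o - 5 * (a + 1) ≤ small by omega)]
        show some (0 + (o - (a + 1) * 5)) = some (o - 5 * (a + 1))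
        congr 1
        omega
      · rw [if_neg hhit]
        rw [ih (a + 1) (by omega)]
        by_cases hlow : o ≤ (a + 1) * 5
        · have hA : ¬(max (a + 1 + 1) (-q) ≤ big ∧ 1 ≤ o - 5 * max (a + 1 + 1) (-q) ∧
              o - 5 * max (a + 1 + 1) (-q) ≤ small) := by
            have := le_max_left (a + 1 + 1) (-q); omega
          have hB : ¬(max (a + 1) (-q) ≤ big ∧ 1 ≤ o - 5 * max (a + 1) (-q) ∧
              o - 5 * max (a + 1) (-q) ≤ small) := by
            have := le_max_left (a + 1) (-q); omega
          rw [if_neg hA, if_neg hB]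
        · -- here o > 5*(a+1) + small, so the ceiling is ≥ a + 2 and the selected count is unchanged
          have hm1 : max (a + 1 + 1) (-q) = -q := by omega
          have hm2 : max (a + 1) (-q) = -q := by omega
          rw [hm1, hm2]

-- ===== VERDICT (by name: the statement is the Claim_ definition above) =====
theorem fruit_order_spec : Claim_equal_fruit_order := by
  intro s g o _
  unfold Spec_fruit_order fruit_order fruit_order_alt
  by_cases h1 : PySem.Int.mod o 5 = 0 ∧ PySem.Int.floordiv o 5 ≤ g
  · rw [if_pos h1, if_pos h1]
  · rw [if_neg h1, if_neg h1]
    by_cases h2 : s ≥ o ∧ o ≥ 0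
    · rw [if_pos h2, if_pos (show 0 ≤ o ∧ o ≤ s by omega)]
    · rw [if_neg h2, if_neg (show ¬(0 ≤ o ∧ o ≤ s) by omega)]
      by_cases h3 : s + g * 5 = o
      · rw [if_pos h3, if_pos h3]
      · rw [if_neg h3, if_neg h3]
        rw [fruitOuter_eq o s g h1 (g - 0).toNat 0 rfl]
        simp only [zero_add]
        by_cases hC : max 1 (-(PySem.Int.floordiv (s - o) 5)) ≤ g ∧
            1 ≤ o - 5 * max 1 (-(PySem.Int.floordiv (s - o) 5)) ∧
            o - 5 * max 1 (-(PySem.Int.floordiv (s - o) 5)) ≤ s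
        · simp only [if_pos hC]
        · simp only [if_neg hC]
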